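-- pv_equiv track=rewrite | github.com/MervinPraison/PraisonAI | src/praisonai/praisonai/cli/configuration/paths.py | env_to_config_key
-- ===== SOURCE A (Python) =====
-- from typing import List, Optional
--
-- def get_env_prefix() -> str:
--     """Get environment variable prefix."""
--     return "PRAISONAI_"
--
-- def env_to_config_key(env_var: str) -> Optional[str]:
--     """
--     Convert environment variable name to config key.
--
--     Example: PRAISONAI_OUTPUT_FORMAT -> output.format
--     """
--     prefix = get_env_prefix()
--     if not env_var.startswith(prefix):
--         return None
--
--     key = env_var[len(prefix):].lower()
--     # Convert underscores to dots for nested keys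
--     # Single underscore = dot, double underscore = single underscore
--     parts = key.split("__")
--     result_parts = []
--     for part in parts:
--         result_parts.append(part.replace("_", "."))
--     return "_".join(result_parts)
-- ===== SOURCE B (Python) =====
-- def env_to_config_key(env_var):
--     prefix = "PRAISONAI_"
--     if not env_var.startswith(prefix):
--         return None
--     key = env_var[len(prefix):].lower()
--     out = []
--     i = 0
--     n = len(key)
--     while i < n:
--         if key[i] == '_' and i + 1 < n and key[i + 1] == '_':
--             out.append('_')
--             i += 2
--         elif key[i] == '_':
--             out.append('.')
--             i += 1
--         else:
--             out.append(key[i])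
--             i += 1
--     return ''.join(out)
-- ===== Notes on version B (the rewrite author's own statement) =====
-- stated objective: alternative
-- what changed: B replaces A's split/replace/join pipeline with a single left-to-right character scan that greedily turns each double underscore into one underscore and each single underscore into a dot, building the output in one pass.
import Mathlib
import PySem

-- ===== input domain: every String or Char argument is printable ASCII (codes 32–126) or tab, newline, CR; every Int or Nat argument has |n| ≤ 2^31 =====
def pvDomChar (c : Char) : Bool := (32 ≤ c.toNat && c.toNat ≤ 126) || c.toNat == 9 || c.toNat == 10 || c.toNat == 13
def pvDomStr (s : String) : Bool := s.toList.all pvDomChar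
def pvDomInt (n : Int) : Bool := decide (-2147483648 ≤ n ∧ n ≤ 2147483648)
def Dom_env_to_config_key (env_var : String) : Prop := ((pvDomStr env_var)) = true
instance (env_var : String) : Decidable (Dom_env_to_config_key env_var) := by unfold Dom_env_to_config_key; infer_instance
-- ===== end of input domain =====

-- B fuses A's split/replace/join pipeline into a single left-to-right greedy character scan (alternative one-pass decomposition, same cost class).

-- ===== PORT A =====
def env_to_config_key (env_var : String) : Option String :=
  let pfx := "PRAISONAI_"
  if ¬ (PySem.Str.startswith env_var pfx) then none
  else
    let key := PySem.Str.lower (PySem.Str.slice env_var (some (PySem.Str.len pfx)) none)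
    let parts := (PySem.Chars.splitOn key.toList "__".toList).map String.ofList
    let result_parts := parts.map (fun part => PySem.Str.replace part "_" ".")
    some (PySem.Str.join "_" result_parts)

-- ===== PORT B =====
-- the index loop of Source B as structural recursion on the remaining characters
def pvScanB : List Char → List Char
  | [] => []
  | '_' :: '_' :: rest2 => '_' :: pvScanB rest2
  | '_' :: rest => '.' :: pvScanB rest
  | c :: rest => c :: pvScanB rest

def env_to_config_key_alt (env_var : String) : Option String :=
  let pfx := "PRAISONAI_"
  if ¬ (PySem.Str.startswith env_var pfx) then none
  else
    let key := PySem.Str.lower (PySem.Str.slice env_var (some (PySem.Str.len pfx)) none)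
    some (String.ofList (pvScanB key.toList))

-- ===== PRECONDITION & SPEC =====
def Spec_env_to_config_key (env_var : String) (out : Option String) : Prop := out = env_to_config_key_alt env_var
instance (env_var : String) (out : Option String) : Decidable (Spec_env_to_config_key env_var out) := by unfold Spec_env_to_config_key; infer_instance

-- ===== CLAIM (what is proved, stated in full; the proofs are below) =====
def Claim_equal_env_to_config_key : Prop := ∀ (env_var : String), Dom_env_to_config_key env_var → Spec_env_to_config_key env_var (env_to_config_key env_var)

-- ===== LEMMAS AND PROOFS =====

def pvSub (c : Char) : Char := if c = '_' then '.' else c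

-- clean recursive form of s.split("__")
def pvSp : List Char → List (List Char)
  | [] => [[]]
  | '_' :: '_' :: rest2 => [] :: pvSp rest2
  | c :: rest => (pvSp rest).modifyHead (c :: ·)

lemma pvSp_ne_nil (l : List Char) : pvSp l ≠ [] := by
  fun_induction pvSp l with
  | case1 => simp
  | case2 r ih => simp
  | case3 c rest h ih =>
    cases hr : pvSp rest with
    | nil => exact absurd hr ih
    | cons a t => simp

lemma pvSp_cons_ne (c : Char) (rest : List Char)
    (h : ¬ (c = '_' ∧ ∃ r2, rest = '_' :: r2)) :
    pvSp (c :: rest) = (pvSp rest).modifyHead (c :: ·) := by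
  rw [pvSp.eq_def]
  split
  next heq => exact absurd heq (List.cons_ne_nil _ _)
  next r2 heq =>
    injection heq with h1 h2
    exact absurd ⟨h1, r2, h2⟩ h
  next c' rest' hne heq =>
    injection heq with h1 h2
    subst h1; subst h2; rfl

lemma pvScanB_cons_ne (c : Char) (rest : List Char)
    (h : ¬ (c = '_' ∧ ∃ r2, rest = '_' :: r2)) :
    pvScanB (c :: rest) = pvSub c :: pvScanB rest := by
  rw [pvScanB.eq_def]
  split
  next heq => exact absurd heq (List.cons_ne_nil _ _)
  next r2 heq =>
    injection heq with h1 h2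
    exact absurd ⟨h1, r2, h2⟩ h
  next rest' heq =>
    injection heq with h1 h2
    subst h1; subst h2; simp [pvSub]
  next c' rest' hne1 hne2 heq =>
    injection heq with h1 h2
    subst h1; subst h2
    have hc : c ≠ '_' := fun hc => hne2 hc
    simp [pvSub, hc]

lemma prefixOf_underscore (t : List Char) :
    (['_'] : List Char).isPrefixOf ('_' :: t) = true := by
  simp [List.isPrefixOf]

lemma replace_go_eq (fuel : ℕ) (l acc : List Char) (h : l.length ≤ fuel) :
    PySem.Chars.replace.go ['_'] ['.'] fuel l acc = acc.reverse ++ l.map pvSub := by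
  induction fuel generalizing l acc with
  | zero =>
    have : l = [] := by cases l <;> simp_all
    subst this; simp [PySem.Chars.replace.go]
  | succ f ih =>
    cases l with
    | nil => simp [PySem.Chars.replace.go]
    | cons c t =>
      rw [PySem.Chars.replace.go]
      by_cases hc : c = '_'
      · subst hc
        simp only [prefixOf_underscore, if_true]
        rw [show List.drop (['_'] : List Char).length ('_' :: t) = t from rfl,
          ih t _ (by simpa using Nat.le_of_succ_le_succ h)]
        simp [pvSub]
      · have hp : (['_'] : List Char).isPrefixOf (c :: t) = false := by
          rw [Bool.eq_false_iff]
          intro hpre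
          rw [List.isPrefixOf_iff_prefix] at hpre
          obtain ⟨tl, htl⟩ := hpre
          simp only [List.cons_append, List.nil_append, List.cons.injEq] at htl
          exact hc htl.1.symm
        simp only [hp, Bool.false_eq_true, if_false]
        rw [ih t _ (by simpa using Nat.le_of_succ_le_succ h)]
        have h2 : pvSub c = c := by simp [pvSub, hc]
        simp only [List.map_cons, h2, List.reverse_cons, List.append_assoc,
          List.singleton_append]

lemma replace_eq_map (l : List Char) :
    PySem.Chars.replace l ['_'] ['.'] = l.map pvSub := by
  rw [PySem.Chars.replace]
  simp only [List.isEmpty_cons, Bool.false_eq_true, if_false]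
  exact (replace_go_eq l.length l [] le_rfl).trans (by simp)

lemma prefixOf_dd (t : List Char) :
    (['_','_'] : List Char).isPrefixOf ('_' :: '_' :: t) = true := by
  simp [List.isPrefixOf]

lemma splitOn_go_eq (fuel : ℕ) (l cur : List Char) (acc : List (List Char))
    (h : l.length ≤ fuel) :
    PySem.Chars.splitOn.go ['_','_'] fuel l cur acc
      = acc.reverse ++ (pvSp l).modifyHead (cur.reverse ++ ·) := by
  induction fuel generalizing l cur acc with
  | zero =>
    have : l = [] := by cases l <;> simp_all
    subst this; simp [PySem.Chars.splitOn.go, pvSp]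
  | succ f ih =>
    cases l with
    | nil => simp [PySem.Chars.splitOn.go, pvSp]
    | cons c rest =>
      by_cases hm : c = '_' ∧ ∃ r2, rest = '_' :: r2
      · obtain ⟨rfl, r2, rfl⟩ := hm
        rw [PySem.Chars.splitOn.go]
        simp only [prefixOf_dd, if_true]
        rw [show List.drop (['_','_'] : List Char).length ('_' :: '_' :: r2) = r2 from rfl,
          ih r2 [] (cur.reverse :: acc) (by simp at h ⊢; omega)]
        cases hr : pvSp r2 with
        | nil => exact absurd hr (pvSp_ne_nil r2)
        | cons a t => simp [pvSp, hr]
      · have hp : (['_','_'] : List Char).isPrefixOf (c :: rest) = false := by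
          rw [Bool.eq_false_iff]
          intro hpre
          rw [List.isPrefixOf_iff_prefix] at hpre
          obtain ⟨tl, htl⟩ := hpre
          simp only [List.cons_append, List.nil_append, List.cons.injEq] at htl
          exact hm ⟨htl.1.symm, tl, htl.2.symm⟩
        rw [PySem.Chars.splitOn.go]
        simp only [hp, Bool.false_eq_true, if_false]
        rw [ih rest (c :: cur) acc (by simp at h ⊢; omega),
          pvSp_cons_ne c rest hm]
        cases hr : pvSp rest with
        | nil => exact absurd hr (pvSp_ne_nil rest)
        | cons a t => simp

lemma splitOn_eq_sp (l : List Char) :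
    PySem.Chars.splitOn l ['_','_'] = pvSp l := by
  rw [PySem.Chars.splitOn, splitOn_go_eq (l.length + 1) l [] [] (by omega)]
  cases hr : pvSp l with
  | nil => exact absurd hr (pvSp_ne_nil l)
  | cons a t => simp

lemma join_sp_eq_scan (l : List Char) :
    PySem.Chars.join ['_'] ((pvSp l).map (List.map pvSub)) = pvScanB l := by
  fun_induction pvSp l with
  | case1 => simp [PySem.Chars.join, pvScanB, List.intercalate]
  | case2 rest ih =>
    cases hr : pvSp rest with
    | nil => exact absurd hr (pvSp_ne_nil rest)
    | cons a t =>
      rw [hr] at ih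
      simp only [pvScanB, ← ih]
      simp [PySem.Chars.join, List.intercalate]
  | case3 c rest hne ih =>
    have hm : ¬ (c = '_' ∧ ∃ r2, rest = '_' :: r2) := by
      rintro ⟨rfl, r2, rfl⟩; exact hne r2 rfl rfl
    cases hr : pvSp rest with
    | nil => exact absurd hr (pvSp_ne_nil rest)
    | cons a t =>
      rw [hr] at ih
      rw [pvScanB_cons_ne c rest hm, ← ih]
      cases t with
      | nil => simp [PySem.Chars.join, List.intercalate]
      | cons b bs => simp [PySem.Chars.join, List.intercalate]

lemma pv_branch_eq (ks : List Char) :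
    PySem.Str.join "_" (List.map ((fun part => PySem.Str.replace part "_" ".") ∘ String.ofList)
        (PySem.Chars.splitOn ks ['_','_']))
      = String.ofList (pvScanB ks) := by
  rw [PySem.Str.join]
  apply congrArg String.ofList
  rw [List.map_map, splitOn_eq_sp]
  have hfun : ∀ p : List Char,
      (String.toList ∘ ((fun part => PySem.Str.replace part "_" ".") ∘ String.ofList)) p
        = p.map pvSub := by
    intro p
    simp [Function.comp, PySem.Str.toList_replace, replace_eq_map]
  rw [show ("_" : String).toList = ['_'] from rfl]
  calc PySem.Chars.join ['_']
        ((pvSp ks).map (String.toList ∘ ((fun part => PySem.Str.replace part "_" ".") ∘ String.ofList)))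
      = PySem.Chars.join ['_'] ((pvSp ks).map (List.map pvSub)) := by
        rw [List.map_congr_left (fun p _ => hfun p)]
    _ = pvScanB ks := join_sp_eq_scan ks

-- ===== VERDICT (by name: the statement is the Claim_ definition above) =====
theorem env_to_config_key_spec : Claim_equal_env_to_config_key := by
  intro env_var _
  unfold Spec_env_to_config_key env_to_config_key env_to_config_key_alt
  cases h : PySem.Chars.startswith env_var.toList ['P','R','A','I','S','O','N','A','I','_'] with
  | false => simp [PySem.Str.startswith, h]
  | true => simp [PySem.Str.startswith, h, pv_branch_eq]
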